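-- pv_equiv track=rewrite | github.com/TheMasterPump/trading-bot- | sniper_detector.py | _detect_coordinated_buying
-- ===== SOURCE A (Python) =====
-- from typing import List, Dict, Optional, Tuple
--
-- def _detect_coordinated_buying(transactions: List[Dict]) -> bool:
--     """
--     Detect if multiple transactions happened at exact same timestamp
--     This indicates bot/script buying (coordinated attack)
--     """
--     if len(transactions) < 3:
--         return False
--
--     from collections import Counter
--
--     # Count transactions per timestamp
--     timestamps = [tx.get("blockTime") for tx in transactions if tx.get("blockTime")]
--
--     if len(timestamps) < 3:
--         return False
--
--     timestamp_counts = Counter(timestamps)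
--
--     # If 3+ transactions at exact same timestamp = coordinated
--     max_same_time = max(timestamp_counts.values()) if timestamp_counts else 0
--
--     return max_same_time >= 3
-- ===== SOURCE B (Python) =====
-- def _detect_coordinated_buying(transactions):
--     """Sort the valid timestamps; equal values then sit adjacently, so some
--     timestamp occurs 3+ times iff ts[i] == ts[i+2] for some i."""
--     ts = sorted(tx.get("blockTime") for tx in transactions if tx.get("blockTime"))
--     for a, c in zip(ts, ts[2:]):
--         if a == c:
--             return True
--     return False
-- ===== Notes on version B (the rewrite author's own statement) =====
-- stated objective: alternative
-- what changed: Replaced hash-map counting (Counter + max) by sort-then-scan: sort the valid timestamps and return True iff ts[i] == ts[i+2] for some i, i.e. an equal pair at distance 2 in the sorted list; the redundant length guards disappear.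
import Mathlib
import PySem

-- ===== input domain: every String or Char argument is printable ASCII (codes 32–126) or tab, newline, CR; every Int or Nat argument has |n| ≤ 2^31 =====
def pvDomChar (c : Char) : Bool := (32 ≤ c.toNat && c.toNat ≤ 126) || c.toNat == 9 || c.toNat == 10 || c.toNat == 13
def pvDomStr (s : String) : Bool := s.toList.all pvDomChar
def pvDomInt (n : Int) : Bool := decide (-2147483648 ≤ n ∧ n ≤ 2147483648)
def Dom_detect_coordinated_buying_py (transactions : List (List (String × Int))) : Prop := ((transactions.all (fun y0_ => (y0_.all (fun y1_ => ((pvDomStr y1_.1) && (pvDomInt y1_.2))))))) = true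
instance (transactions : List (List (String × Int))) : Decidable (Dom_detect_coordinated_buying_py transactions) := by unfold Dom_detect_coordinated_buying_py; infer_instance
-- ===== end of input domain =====

-- B replaces A's Counter + max pipeline by sort-then-scan: sort the valid timestamps and
-- look for an equal pair at distance 2 (objective: alternative algorithm, not faster).


-- ===== PORT A =====
-- tx.get("blockTime") kept when truthy (non-None and nonzero), as in A's comprehension filter
def dcbTime? (tx : List (String × Int)) : Option Int :=
  match (PySem.Dict.mk tx).get? "blockTime" with
  | some t => if t ≠ 0 then some t else none
  | none => none

def detect_coordinated_buying_py (transactions : List (List (String × Int))) : Bool :=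
  if transactions.length < 3 then false
  else
    let timestamps := transactions.filterMap dcbTime?
    if timestamps.length < 3 then false
    else
      let timestamp_counts := PySem.Dict.counter timestamps
      let max_same_time : Int :=
        if timestamp_counts.size ≠ 0 then
          (PySem.List.max? timestamp_counts.values (fun x => x)).getD 0
        else 0
      decide (3 ≤ max_same_time)

-- ===== PORT B =====
-- sorted ts, then the early-exit loop over zip(ts, ts[2:]) as List.any over the zip
def detect_coordinated_buying_py_alt (transactions : List (List (String × Int))) : Bool :=
  let ts := PySem.List.sorted (transactions.filterMap dcbTime?) (fun x => x) false
  (ts.zip (PySem.List.slice ts (some 2) none)).any (fun p => p.1 == p.2)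

-- ===== PRECONDITION & SPEC =====
def Spec_detect_coordinated_buying_py (transactions : List (List (String × Int))) (out : Bool) : Prop := out = detect_coordinated_buying_py_alt transactions
instance (transactions : List (List (String × Int))) (out : Bool) : Decidable (Spec_detect_coordinated_buying_py transactions out) := by unfold Spec_detect_coordinated_buying_py; infer_instance

-- ===== CLAIM (what is proved, stated in full; the proofs are below) =====
def Claim_equal_detect_coordinated_buying_py : Prop := ∀ (transactions : List (List (String × Int))), Dom_detect_coordinated_buying_py transactions → Spec_detect_coordinated_buying_py transactions (detect_coordinated_buying_py transactions)

-- ===== LEMMAS AND PROOFS =====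

-- The list of valid timestamps (A's "timestamps"); B sorts the same list
def dcbTs (txs : List (List (String × Int))) : List Int := txs.filterMap dcbTime?

-- In a ≤-sorted list, an equal pair at distance 2 exists iff some value occurs ≥ 3 times
theorem dcbTriple_iff (l : List Int) (hs : l.Pairwise (· ≤ ·)) :
    ((l.zip (l.drop 2)).any (fun p => p.1 == p.2) = true) ↔ ∃ t : Int, 3 ≤ l.count t := by
  induction l with
  | nil =>
    simp only [List.drop_nil, List.zip_nil_right, List.any_nil, Bool.false_eq_true, false_iff]
    rintro ⟨t, ht⟩; simp at ht
  | cons a tl ih =>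
    match tl, hs with
    | [], _ =>
      constructor
      · intro h; simp at h
      · rintro ⟨t, ht⟩
        have : List.count t [a] ≤ 1 := by
          simpa using List.count_le_length (l := [a]) (a := t)
        omega
    | [b], _ =>
      constructor
      · intro h; simp at h
      · rintro ⟨t, ht⟩
        have : List.count t [a, b] ≤ 2 := by
          simpa using List.count_le_length (l := [a, b]) (a := t)
        omega
    | b :: c :: rest, hs =>
      have hab : a ≤ b := (List.pairwise_cons.mp hs).1 b (by simp)
      have hac : a ≤ c := (List.pairwise_cons.mp hs).1 c (by simp)
      have htl : (b :: c :: rest).Pairwise (· ≤ ·) := (List.pairwise_cons.mp hs).2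
      have hbc : b ≤ c := (List.pairwise_cons.mp htl).1 c (by simp)
      have hcr : ∀ x ∈ rest, c ≤ x :=
        (List.pairwise_cons.mp (List.pairwise_cons.mp htl).2).1
      have hzip : ((a :: b :: c :: rest).zip ((a :: b :: c :: rest).drop 2))
          = (a, c) :: ((b :: c :: rest).zip ((b :: c :: rest).drop 2)) := by
        simp [List.zip]
      rw [hzip, List.any_cons]
      by_cases hace : a = c
      · have hbe : b = c := le_antisymm hbc (hace ▸ hab)
        simp only [hace, beq_self_eq_true, Bool.true_or, true_iff]
        refine ⟨c, ?_⟩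
        rw [hbe]
        have h1 : List.count c (c :: c :: c :: rest) = List.count c (c :: c :: rest) + 1 :=
          List.count_cons_self
        have h2 : List.count c (c :: c :: rest) = List.count c (c :: rest) + 1 :=
          List.count_cons_self
        have h3 : List.count c (c :: rest) = List.count c rest + 1 :=
          List.count_cons_self
        omega
      · have hstep : ((a == c) || ((b :: c :: rest).zip ((b :: c :: rest).drop 2)).any
            (fun p => p.1 == p.2))
            = ((b :: c :: rest).zip ((b :: c :: rest).drop 2)).any (fun p => p.1 == p.2) := by
          simp [hace]
        rw [hstep, ih htl]
        constructor
        · rintro ⟨t, ht⟩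
          refine ⟨t, ?_⟩
          have h : List.count t (b :: c :: rest) ≤ List.count t (a :: b :: c :: rest) := by
            conv_rhs => rw [List.count_cons]
            split <;> omega
          omega
        · rintro ⟨t, ht⟩
          by_cases hta : t = a
          · exfalso
            subst hta
            have hlt : t < c := lt_of_le_of_ne hac hace
            have hcr0 : List.count t rest = 0 := by
              refine List.count_eq_zero.mpr ?_
              intro hmem
              exact absurd (hcr t hmem) (not_le.mpr hlt)
            have h1 : List.count t (t :: b :: c :: rest)
                = List.count t (b :: c :: rest) + 1 := List.count_cons_self
            have h2 : List.count t (b :: c :: rest) ≤ List.count t (c :: rest) + 1 := by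
              conv_lhs => rw [List.count_cons]
              split <;> omega
            have h3 : List.count t (c :: rest) = List.count t rest := by
              rw [List.count_cons]
              simp [Ne.symm hace]
            omega
          · refine ⟨t, ?_⟩
            have h : List.count t (a :: b :: c :: rest) = List.count t (b :: c :: rest) := by
              rw [List.count_cons]
              simp [Ne.symm hta]
            omega

-- B returns true iff some timestamp occurs at least 3 times among the valid ones
theorem dcbAlt_iff (txs : List (List (String × Int))) :
    detect_coordinated_buying_py_alt txs = true ↔
      ∃ t : Int, 3 ≤ ((dcbTs txs).count t : Int) := by
  have hsl : PySem.List.slice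
      (PySem.List.sorted (txs.filterMap dcbTime?) (fun x => x) false) (some 2) none
      = (PySem.List.sorted (txs.filterMap dcbTime?) (fun x => x) false).drop 2 := by
    simpa using PySem.List.slice_from_natCast
      (xs := PySem.List.sorted (txs.filterMap dcbTime?) (fun x => x) false) (a := 2)
  simp only [detect_coordinated_buying_py_alt]
  rw [hsl, dcbTriple_iff _ (PySem.List.sorted_pairwise (txs.filterMap dcbTime?) (fun x => x))]
  have hperm := PySem.List.sorted_perm (txs.filterMap dcbTime?) (fun x => x) false
  constructor
  · rintro ⟨t, ht⟩
    refine ⟨t, ?_⟩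
    simp only [dcbTs]
    rw [← hperm.count_eq t]
    omega
  · rintro ⟨t, ht⟩
    refine ⟨t, ?_⟩
    simp only [dcbTs] at ht
    rw [hperm.count_eq t]
    omega

-- A returns true iff some timestamp occurs at least 3 times among the valid ones
theorem dcbA_iff (txs : List (List (String × Int))) :
    detect_coordinated_buying_py txs = true ↔
      ∃ t : Int, 3 ≤ ((dcbTs txs).count t : Int) := by
  by_cases hlen : txs.length < 3
  · simp only [detect_coordinated_buying_py, if_pos hlen, Bool.false_eq_true, false_iff]
    rintro ⟨t, ht⟩
    have h1 : (dcbTs txs).count t ≤ (dcbTs txs).length := List.count_le_length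
    have h2 : (dcbTs txs).length ≤ txs.length := by
      simpa [dcbTs] using List.length_filterMap_le dcbTime? txs
    omega
  by_cases hts : (txs.filterMap dcbTime?).length < 3
  · simp only [detect_coordinated_buying_py, if_neg hlen, if_pos hts, Bool.false_eq_true,
      false_iff]
    rintro ⟨t, ht⟩
    have h1 : (dcbTs txs).count t ≤ (dcbTs txs).length := List.count_le_length
    simp only [dcbTs] at h1 ht
    omega
  have hne : txs.filterMap dcbTime? ≠ [] := by
    intro h; rw [h] at hts; simp at hts
  obtain ⟨a, tl, hcons⟩ : ∃ a tl, txs.filterMap dcbTime? = a :: tl := by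
    cases h : txs.filterMap dcbTime? with
    | nil => exact absurd h hne
    | cons a tl => exact ⟨a, tl, rfl⟩
  have hamem : a ∈ PySem.Set.ofList (txs.filterMap dcbTime?) :=
    (PySem.Set.mem_ofList _ a).mpr (hcons ▸ List.mem_cons_self)
  have hsetne : PySem.Set.ofList (txs.filterMap dcbTime?) ≠ [] := by
    intro h; rw [h] at hamem; cases hamem
  have hsize : (PySem.Dict.counter (txs.filterMap dcbTime?)).size ≠ 0 := by
    simp only [PySem.Dict.size, PySem.Dict.items_counter, List.length_map]
    intro h
    exact hsetne (List.eq_nil_of_length_eq_zero h)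
  have hvalsne : (PySem.Dict.counter (txs.filterMap dcbTime?)).values ≠ [] := by
    simp only [PySem.Dict.values, PySem.Dict.items_counter, List.map_map]
    intro h
    exact hsetne (List.map_eq_nil_iff.mp h)
  obtain ⟨m, hm⟩ : ∃ m, PySem.List.max?
      (PySem.Dict.counter (txs.filterMap dcbTime?)).values (fun x => x) = some m := by
    cases h : PySem.List.max? (PySem.Dict.counter (txs.filterMap dcbTime?)).values
        (fun x => x) with
    | none =>
        rw [PySem.List.max?_eq_none_iff] at h
        exact absurd h hvalsne
    | some m => exact ⟨m, rfl⟩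
  simp only [detect_coordinated_buying_py, if_neg hlen, if_neg hts, if_pos hsize, hm,
    Option.getD_some, decide_eq_true_eq, dcbTs]
  have hvals : (PySem.Dict.counter (txs.filterMap dcbTime?)).values =
      ((PySem.Dict.counter (txs.filterMap dcbTime?)).keys).map
        (fun k => (PySem.Dict.counter (txs.filterMap dcbTime?)).getD k 0) :=
    PySem.Dict.values_eq_map_keys _ (PySem.Dict.nodup_keys_counter _) 0
  constructor
  · intro h3m
    have hmmem := PySem.List.max?_mem hm
    rw [hvals] at hmmem
    obtain ⟨k, _, hk⟩ := List.mem_map.mp hmmem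
    refine ⟨k, ?_⟩
    rw [← hk] at h3m
    rwa [PySem.Dict.getD_counter] at h3m
  · rintro ⟨t, ht⟩
    have htmem : t ∈ txs.filterMap dcbTime? := List.count_pos_iff.mp (by omega)
    have htk : t ∈ (PySem.Dict.counter (txs.filterMap dcbTime?)).keys := by
      rw [PySem.Dict.keys_counter]
      exact (PySem.Set.mem_ofList _ t).mpr htmem
    have hv : (((txs.filterMap dcbTime?).count t : Int)) ∈
        (PySem.Dict.counter (txs.filterMap dcbTime?)).values := by
      rw [hvals]
      exact List.mem_map.mpr ⟨t, htk, by rw [PySem.Dict.getD_counter]⟩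
    have hle := PySem.List.max?_isMax hm _ hv
    simp only at hle
    omega

-- ===== VERDICT (by name: the statement is the Claim_ definition above) =====
theorem detect_coordinated_buying_py_spec : Claim_equal_detect_coordinated_buying_py := by
  intro txs _
  unfold Spec_detect_coordinated_buying_py
  cases hA : detect_coordinated_buying_py txs with
  | true =>
    exact ((dcbAlt_iff txs).mpr ((dcbA_iff txs).mp hA)).symm
  | false =>
    cases hB : detect_coordinated_buying_py_alt txs with
    | true => rw [(dcbA_iff txs).mpr ((dcbAlt_iff txs).mp hB)] at hA; cases hA
    | false => rfl
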